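-- pv_equiv track=rewrite | github.com/rnaarla/CodeSamplesDSA | Dynamic_Programming/Find_Minimum_Time.py | minimumTimeRequired
-- ===== SOURCE A (Python) =====
-- def minimumTimeRequired(jobs, k):
--     def check(limit):
--         "Check if it's possible to divide jobs s.t. each worker's workload is <= limit"
--         workloads = [0] * k
--         return dfs(0, limit, workloads)
--
--     def dfs(i, limit, workloads):
--         if i >= len(jobs):
--             return True
--         for j in range(k):
--             if workloads[j] + jobs[i] <= limit:
--                 workloads[j] += jobs[i]
--                 if dfs(i+1, limit, workloads):
--                     return True
--                 workloads[j] -= jobs[i]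
--             if workloads[j] == 0:
--                 break
--         return False
--
--     jobs.sort(reverse=True)
--     l, r = jobs[0], sum(jobs)
--     while l < r:
--         mid = (l + r) // 2
--         if check(mid):
--             r = mid
--         else:
--             l = mid + 1
--     return l
-- ===== SOURCE B (Python) =====
-- def minimumTimeRequired(jobs, k):
--     # Same answer as the original (sorts `jobs` in place, same as the original);
--     # the backtracking recursion is replaced by an explicit-stack iteration and
--     # the bisection while-loop by a recursive bisection.
--     jobs.sort(reverse=True)
--     n = len(jobs)
--
--     def feasible(limit):
--         # iterative depth-first search; a frame (i, j, w) means
--         # "about to try worker j for job i with current loads w"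
--         stack = [(0, 0, (0,) * k)]
--         while stack:
--             i, j, w = stack.pop()
--             if i >= n:
--                 return True
--             if j >= k:
--                 continue
--             if w[j] != 0:  # the original breaks out of its worker loop here
--                 stack.append((i, j + 1, w))
--             if w[j] + jobs[i] <= limit:
--                 stack.append((i + 1, 0, w[:j] + (w[j] + jobs[i],) + w[j + 1:]))
--         return False
--
--     def solve(l, r):
--         if l >= r:
--             return l
--         mid = (l + r) // 2
--         return solve(l, mid) if feasible(mid) else solve(mid + 1, r)
--
--     return solve(jobs[0], sum(jobs))
-- ===== Notes on version B (the rewrite author's own statement) =====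
-- stated objective: alternative
-- what changed: The recursive backtracking search (dfs over workers with in-place undo) is replaced by an iterative depth-first search over an explicit stack of (job, worker, loads) frames, and the bisection while-loop by a recursive bisection; the hinted subset-DP was not used because it would not reproduce A's exact values on inputs with negative jobs, where A's zero-load pruning and bisection range do not give the true optimum.
import Mathlib
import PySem

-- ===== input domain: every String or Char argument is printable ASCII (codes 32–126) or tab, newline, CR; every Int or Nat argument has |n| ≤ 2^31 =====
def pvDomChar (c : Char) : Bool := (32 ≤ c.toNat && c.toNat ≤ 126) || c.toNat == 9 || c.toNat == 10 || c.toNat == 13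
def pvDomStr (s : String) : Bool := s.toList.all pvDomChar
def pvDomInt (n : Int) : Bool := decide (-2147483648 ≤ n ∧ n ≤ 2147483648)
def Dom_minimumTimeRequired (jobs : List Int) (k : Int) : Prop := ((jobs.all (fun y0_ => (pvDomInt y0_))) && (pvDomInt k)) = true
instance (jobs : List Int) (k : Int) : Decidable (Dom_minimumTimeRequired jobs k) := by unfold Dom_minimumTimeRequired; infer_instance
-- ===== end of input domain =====

-- B replaces A's recursive backtracking by an explicit-stack DFS and the bisection
-- while-loop by a recursive bisection; equal return values (both sort `jobs` in place
-- in Python, so the side effect is identical too).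

-- ===== PORT A =====

-- dfs(i, limit, workloads): the for-loop over workers j is the structural recursion on j;
-- `workloads[j]` / `jobs[i]` are in range whenever read (j < k = length workloads, i < length jobs),
-- so List.getD is exact there.
def dfsA (jobs : List Int) (k : Nat) (limit : Int) (i j : Nat) (w : List Int) : Bool :=
  if jobs.length ≤ i then true
  else if k ≤ j then false
  else
    if w.getD j 0 + jobs.getD i 0 ≤ limit then
      if dfsA jobs k limit (i+1) 0 (w.set j (w.getD j 0 + jobs.getD i 0)) then true
      else if w.getD j 0 = 0 then false else dfsA jobs k limit i (j+1) w
    else if w.getD j 0 = 0 then false else dfsA jobs k limit i (j+1) w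
termination_by (jobs.length - i, k - j)
decreasing_by all_goals simp_wf; omega

-- check(limit): workloads = [0] * k  ([0]*k = [] for k ≤ 0, hence k.toNat at the call site)
def checkA (jobs : List Int) (k : Nat) (limit : Int) : Bool :=
  dfsA jobs k limit 0 0 (List.replicate k 0)

-- the `while l < r` bisection loop
def whileA (jobs : List Int) (k : Nat) (l r : Int) : Int :=
  if l < r then
    let mid := PySem.Int.floordiv (l + r) 2
    if checkA jobs k mid then whileA jobs k l mid else whileA jobs k (mid+1) r
  else l
termination_by (r - l).toNat
decreasing_by all_goals simp_wf; omega

def minimumTimeRequired (jobs : List Int) (k : Int) : Int :=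
  let js := PySem.List.sorted jobs (fun x => x) true   -- jobs.sort(reverse=True)
  let l := PySem.List.pyGetD js 0 0                    -- jobs[0]; IndexError on [] is excluded by Pre_
  let r := js.sum                                      -- sum(jobs)
  whileA js k.toNat l r

-- ===== PORT B =====

-- weight of a stack frame, used only for termination of stackRunB
def frameWtB (n k : Nat) (f : Nat × Nat × List Int) : Nat :=
  if n ≤ f.1 then 1 else (k - f.2.1) * (k+2)^(n - f.1) + 1

def stackWtB (n k : Nat) (s : List (Nat × Nat × List Int)) : Nat :=
  (s.map (frameWtB n k)).sum

theorem frameWtB_pos (n k : Nat) (f : Nat × Nat × List Int) : 0 < frameWtB n k f := by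
  unfold frameWtB; split <;> omega

theorem frameWtB_step (n k i j : Nat) (w w' w2 : List Int) (hi : i < n) (hj : j < k) :
    frameWtB n k (i, j+1, w) + frameWtB n k (i+1, 0, w') < frameWtB n k (i, j, w2) := by
  have hX : 1 ≤ (k+2)^(n - (i+1)) := Nat.one_le_pow _ _ (by omega)
  have h2 : (k+2)^(n-i) = k * (k+2)^(n - (i+1)) + 2 * (k+2)^(n - (i+1)) := by
    rw [show n - i = (n - (i+1)) + 1 by omega, pow_succ]; ring
  have h3 : frameWtB n k (i+1, 0, w') ≤ k * (k+2)^(n - (i+1)) + 1 := by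
    unfold frameWtB; split
    · omega
    · simp only [Nat.sub_zero]; omega
  have h1 : (k-j) * (k+2)^(n-i) = (k-(j+1)) * (k+2)^(n-i) + (k+2)^(n-i) := by
    rw [show k - j = (k - (j+1)) + 1 by omega, Nat.succ_mul]
  have hA : frameWtB n k (i, j+1, w) = (k-(j+1))*(k+2)^(n-i) + 1 := by
    unfold frameWtB; simp [show ¬ n ≤ i by omega]
  have hB : frameWtB n k (i, j, w2) = (k-j)*(k+2)^(n-i) + 1 := by
    unfold frameWtB; simp [show ¬ n ≤ i by omega]
  rw [hA, hB]; omega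

-- feasible(limit): iterative DFS over an explicit stack of frames (i, j, w)
def stackRunB (jobs : List Int) (k : Nat) (limit : Int) (stack : List (Nat × Nat × List Int)) : Bool :=
  match stack with
  | [] => false
  | (i, j, w) :: rest =>
    if jobs.length ≤ i then true
    else if k ≤ j then stackRunB jobs k limit rest
    else
      let rest' := if w.getD j 0 ≠ 0 then (i, j+1, w) :: rest else rest
      if w.getD j 0 + jobs.getD i 0 ≤ limit then
        stackRunB jobs k limit ((i+1, 0, w.set j (w.getD j 0 + jobs.getD i 0)) :: rest')
      else stackRunB jobs k limit rest'
termination_by stackWtB jobs.length k stack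
decreasing_by
  · simp only [stackWtB, List.map_cons, List.sum_cons]
    have := frameWtB_pos jobs.length k (i, j, w); omega
  · simp only [stackWtB, List.map_cons, List.sum_cons]
    split
    · simp only [List.map_cons, List.sum_cons]
      have := frameWtB_step jobs.length k i j w (w.set j (w.getD j 0 + jobs.getD i 0)) w (by omega) (by omega)
      omega
    · have h1 := frameWtB_step jobs.length k i j w (w.set j (w.getD j 0 + jobs.getD i 0)) w (by omega) (by omega)
      have h2 := frameWtB_pos jobs.length k (i, j+1, w)
      omega
  · split
    · simp only [stackWtB, List.map_cons, List.sum_cons]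
      have h2 := frameWtB_step jobs.length k i j w w w (by omega) (by omega)
      omega
    · simp only [stackWtB, List.map_cons, List.sum_cons]
      have := frameWtB_pos jobs.length k (i, j, w); omega

def feasibleB (jobs : List Int) (k : Nat) (limit : Int) : Bool :=
  stackRunB jobs k limit [(0, 0, List.replicate k 0)]

-- solve(l, r): recursive bisection
def solveB (jobs : List Int) (k : Nat) (l r : Int) : Int :=
  if l < r then
    let mid := PySem.Int.floordiv (l + r) 2
    if feasibleB jobs k mid then solveB jobs k l mid else solveB jobs k (mid+1) r
  else l
termination_by (r - l).toNat
decreasing_by all_goals simp_wf; omega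

def minimumTimeRequired_alt (jobs : List Int) (k : Int) : Int :=
  let js := PySem.List.sorted jobs (fun x => x) true
  solveB js k.toNat (PySem.List.pyGetD js 0 0) js.sum

-- ===== PRECONDITION & SPEC =====
-- A raises IndexError on jobs = [] (jobs[0]); B raises there too; excluded.
def Pre_minimumTimeRequired (jobs : List Int) (k : Int) : Prop := jobs ≠ []
instance (jobs : List Int) (k : Int) : Decidable (Pre_minimumTimeRequired jobs k) := by
  unfold Pre_minimumTimeRequired; infer_instance

def pvWitness_minimumTimeRequired : List Int × Int := ([3, 1, 2], 2)

def Spec_minimumTimeRequired (jobs : List Int) (k : Int) (out : Int) : Prop := out = minimumTimeRequired_alt jobs k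
instance (jobs : List Int) (k : Int) (out : Int) : Decidable (Spec_minimumTimeRequired jobs k out) := by unfold Spec_minimumTimeRequired; infer_instance

-- ===== CLAIM (what is proved, stated in full; the proofs are below) =====
def Claim_equal_minimumTimeRequired : Prop := ∀ (jobs : List Int) (k : Int), Dom_minimumTimeRequired jobs k → Pre_minimumTimeRequired jobs k → Spec_minimumTimeRequired jobs k (minimumTimeRequired jobs k)

-- ===== LEMMAS AND PROOFS =====

-- the stack machine computes exactly the recursive dfs: popping a frame evaluates it,
-- then falls through to the rest of the stack
theorem stackRunB_eq_dfsA (jobs : List Int) (k : Nat) (limit : Int) (i j : Nat) (w : List Int) :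
    ∀ S, stackRunB jobs k limit ((i, j, w) :: S) =
      (dfsA jobs k limit i j w || stackRunB jobs k limit S) := by
  fun_induction dfsA jobs k limit i j w with
  | case1 i j w hlen => intro S; rw [stackRunB]; simp [hlen]
  | case2 i j w hlen hk => intro S; rw [stackRunB]; simp [hlen, hk]
  | case3 i j w hlen hk hcond hrec ih1 =>
      intro S; rw [stackRunB]; simp_all
  | case4 i j w hlen hk hcond hrec hz ih1 =>
      intro S; rw [stackRunB]; simp_all
  | case5 i j w hlen hk hcond hrec hz ih2 ih1 =>
      intro S; rw [stackRunB]; simp_all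
      rw [decide_eq_false (show ¬ jobs.length ≤ i by omega), if_neg (show ¬ k ≤ j by omega)]
      simp only [Bool.false_or]
  | case6 i j w hlen hk hcond hz =>
      intro S; rw [stackRunB]; simp_all
      rw [decide_eq_false (show ¬ jobs.length ≤ i by omega), if_neg (show ¬ k ≤ j by omega)]
      simp only [Bool.false_or]
      first | rfl | (split_ifs with hcase <;> first | rfl | omega)
  | case7 i j w hlen hk hcond hz ih1 =>
      intro S; rw [stackRunB]; simp_all
      rw [decide_eq_false (show ¬ jobs.length ≤ i by omega), if_neg (show ¬ k ≤ j by omega)]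
      simp only [Bool.false_or]
      first | rfl | (split_ifs with hcase <;> first | rfl | omega)
theorem feasibleB_eq_checkA (jobs : List Int) (k : Nat) (limit : Int) :
    feasibleB jobs k limit = checkA jobs k limit := by
  unfold feasibleB checkA
  rw [stackRunB_eq_dfsA]
  simp [stackRunB]

theorem solveB_eq_whileA (jobs : List Int) (k : Nat) (l r : Int) :
    solveB jobs k l r = whileA jobs k l r := by
  fun_induction solveB jobs k l r with
  | case1 l r hlr mid hf ih =>
      rw [whileA]; simp only [if_pos hlr]
      rw [feasibleB_eq_checkA] at hf
      rw [show PySem.Int.floordiv (l + r) 2 = mid from rfl, if_pos hf]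
      exact ih
  | case2 l r hlr mid hf ih =>
      rw [whileA]; simp only [if_pos hlr]
      rw [feasibleB_eq_checkA] at hf
      rw [show PySem.Int.floordiv (l + r) 2 = mid from rfl, if_neg hf]
      exact ih
  | case3 l r hlr => rw [whileA, if_neg hlr]

-- ===== VERDICT (by name: the statement is the Claim_ definition above) =====
theorem minimumTimeRequired_spec : Claim_equal_minimumTimeRequired := by
  intro jobs k _ _
  unfold Spec_minimumTimeRequired minimumTimeRequired minimumTimeRequired_alt
  simp only [solveB_eq_whileA]
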